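-- pv_equiv track=rewrite | github.com/UltraTDK/LaboratorACTN | Tema1/functions.py | vector_mesaj
-- ===== SOURCE A (Python) =====
-- def vector_mesaj(mesaj):
--     # parametrul1: mesajul pe care il convertim
--     # rezultat: vectorul mesaj
--
--     rezultat = []
--     for caracter in mesaj:
--         if caracter >= '0' and caracter <= '9':
--             rezultat.append(int(caracter))
--         elif caracter >= 'a' and caracter <= 'z':
--             # char - 87: pt a fi in intervalul (10-35)
--             rezultat.append(ord(caracter) - 87)
--         elif caracter >= 'A' and caracter <= 'Z':
--             # char - 29: pt a fi in intervalul (36-62)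
--             rezultat.append(ord(caracter) - 29)
--
--     return rezultat
-- ===== SOURCE B (Python) =====
-- def vector_mesaj(mesaj):
--     # Three class-specific passes collect (position, value) pairs, then a
--     # sort on position merges them back into message order (positions are
--     # distinct, so the order is exactly that of the original scan).
--     pairs = []
--     for base, lo, hi in ((48, '0', '9'), (87, 'a', 'z'), (29, 'A', 'Z')):
--         pairs += [(i, ord(c) - base) for i, c in enumerate(mesaj) if lo <= c <= hi]
--     pairs.sort(key=lambda p: p[0])
--     return [v for _, v in pairs]
-- ===== Notes on version B (the rewrite author's own statement) =====
-- stated objective: alternative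
-- what changed: Replaces the single interleaved three-branch loop with three separate class-specific filtered passes (digits, lowercase, uppercase) that collect (index, value) pairs, merged by sorting on index and projecting the values; correct because the classes are disjoint and indices are distinct.
import Mathlib
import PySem

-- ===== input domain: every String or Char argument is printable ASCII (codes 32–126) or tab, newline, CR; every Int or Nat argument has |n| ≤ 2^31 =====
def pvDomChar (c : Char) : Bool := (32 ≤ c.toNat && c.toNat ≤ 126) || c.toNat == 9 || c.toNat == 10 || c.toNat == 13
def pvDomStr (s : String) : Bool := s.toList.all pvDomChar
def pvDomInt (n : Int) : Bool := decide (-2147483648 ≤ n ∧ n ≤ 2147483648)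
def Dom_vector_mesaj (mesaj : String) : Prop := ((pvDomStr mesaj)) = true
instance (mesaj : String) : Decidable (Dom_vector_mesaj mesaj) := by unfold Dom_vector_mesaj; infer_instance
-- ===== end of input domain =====

-- B replaces A's single interleaved three-branch loop by three class-specific passes
-- collecting (index, value) pairs, merged by sorting on index (objective: alternative).

-- ===== PORT A =====
-- one loop iteration: the three ordered branches of A's if/elif chain
def vectorMesajStep (rezultat : List Int) (caracter : Char) : List Int :=
  if '0' ≤ caracter ∧ caracter ≤ '9' then
    -- int(caracter): the branch guarantees a digit, so ofChars? is always some here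
    rezultat ++ [(PySem.Int.ofChars? [caracter]).getD 0]
  else if 'a' ≤ caracter ∧ caracter ≤ 'z' then
    rezultat ++ [(caracter.toNat : Int) - 87]
  else if 'A' ≤ caracter ∧ caracter ≤ 'Z' then
    rezultat ++ [(caracter.toNat : Int) - 29]
  else rezultat

def vector_mesaj (mesaj : String) : List Int :=
  mesaj.toList.foldl vectorMesajStep []

-- ===== PORT B =====
-- one pass of B's loop body: [(i, ord(c) - base) for i, c in enumerate(mesaj) if lo <= c <= hi]
def pvClassPairs (base : Int) (lo hi : Char) (xs : List Char) : List (Int × Int) :=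
  (PySem.List.enumerate xs).filterMap
    (fun p => if lo ≤ p.2 ∧ p.2 ≤ hi then some (p.1, (p.2.toNat : Int) - base) else none)

def vector_mesaj_alt (mesaj : String) : List Int :=
  let xs := mesaj.toList
  -- pairs += … for (base, lo, hi) in ((48,'0','9'), (87,'a','z'), (29,'A','Z'))
  let pairs := pvClassPairs 48 '0' '9' xs ++ pvClassPairs 87 'a' 'z' xs ++ pvClassPairs 29 'A' 'Z' xs
  -- pairs.sort(key=lambda p: p[0]); return [v for _, v in pairs]
  (PySem.List.sorted pairs (fun p => p.1) false).map (fun p => p.2)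

-- ===== PRECONDITION & SPEC =====
def Spec_vector_mesaj (mesaj : String) (out : List Int) : Prop := out = vector_mesaj_alt mesaj
instance (mesaj : String) (out : List Int) : Decidable (Spec_vector_mesaj mesaj out) := by unfold Spec_vector_mesaj; infer_instance

-- ===== CLAIM (what is proved, stated in full; the proofs are below) =====
def Claim_equal_vector_mesaj : Prop := ∀ (mesaj : String), Dom_vector_mesaj mesaj → Spec_vector_mesaj mesaj (vector_mesaj mesaj)

-- ===== LEMMAS AND PROOFS =====

-- the merged per-character classification both programs implement
def pvF (c : Char) : Option Int :=
  if '0' ≤ c ∧ c ≤ '9' then some ((c.toNat : Int) - 48)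
  else if 'a' ≤ c ∧ c ≤ 'z' then some ((c.toNat : Int) - 87)
  else if 'A' ≤ c ∧ c ≤ 'Z' then some ((c.toNat : Int) - 29)
  else none

-- the (index, value) pair list in message order
def pvInOrder (xs : List Char) : List (Int × Int) :=
  (PySem.List.enumerate xs).filterMap (fun p => (pvF p.2).map (fun v => (p.1, v)))

-- ===== A side: the fold is the in-order filterMap of pvF =====
set_option maxRecDepth 8192 in
theorem step_eq_of_dom_nat : ∀ n < 127,
    vectorMesajStep [] (Char.ofNat n) = (pvF (Char.ofNat n)).toList := by
  decide

theorem step_eq_of_dom (c : Char) (h : pvDomChar c = true) :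
    vectorMesajStep [] c = (pvF c).toList := by
  have hlt : c.toNat < 127 := by simp [pvDomChar] at h; omega
  have := step_eq_of_dom_nat c.toNat hlt
  rwa [Char.ofNat_toNat] at this

theorem foldl_shift (xs : List Char) (acc : List Int) :
    xs.foldl vectorMesajStep acc = acc ++ xs.foldl vectorMesajStep [] := by
  induction xs generalizing acc with
  | nil => simp
  | cons c xs ih =>
    simp only [List.foldl_cons]
    rw [ih, ih (vectorMesajStep [] c)]
    simp [vectorMesajStep]
    split_ifs <;> simp

theorem a_eq_filterMap (xs : List Char) (hd : ∀ c ∈ xs, pvDomChar c = true) :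
    xs.foldl vectorMesajStep [] = xs.filterMap pvF := by
  induction xs with
  | nil => rfl
  | cons c xs ih =>
    have hc := step_eq_of_dom c (hd c (by simp))
    have hxs : ∀ x ∈ xs, pvDomChar x = true := fun x hx => hd x (List.mem_cons_of_mem c hx)
    simp only [List.foldl_cons, List.filterMap_cons]
    rw [foldl_shift, ih hxs, hc]
    cases pvF c <;> simp

-- ===== B side =====

-- three filterMaps with pointwise-disjoint supports, concatenated, are a permutation
-- of the single filterMap of their Option.or-chain
theorem perm3 {α β : Type} (g0 g1 g2 : α → Option β)
    (h01 : ∀ p, g0 p = none ∨ g1 p = none)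
    (h02 : ∀ p, g0 p = none ∨ g2 p = none)
    (h12 : ∀ p, g1 p = none ∨ g2 p = none) :
    ∀ E : List α,
      (E.filterMap g0 ++ E.filterMap g1 ++ E.filterMap g2).Perm
        (E.filterMap (fun p => ((g0 p).or ((g1 p).or (g2 p))))) := by
  intro E
  induction E with
  | nil => simp
  | cons p E ih =>
    simp only [List.filterMap_cons]
    cases hg0 : g0 p with
    | some b =>
      have hg1 : g1 p = none := (h01 p).resolve_left (by simp [hg0])
      have hg2 : g2 p = none := (h02 p).resolve_left (by simp [hg0])
      simp only [hg1, hg2, Option.some_or]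
      rw [List.cons_append, List.cons_append]
      exact ih.cons b
    | none =>
      cases hg1 : g1 p with
      | some b =>
        have hg2 : g2 p = none := (h12 p).resolve_left (by simp [hg1])
        simp only [hg2, Option.none_or, Option.some_or]
        have ih' : (E.filterMap g0 ++ (E.filterMap g1 ++ E.filterMap g2)).Perm
            (E.filterMap (fun p => ((g0 p).or ((g1 p).or (g2 p))))) := by
          rw [← List.append_assoc]; exact ih
        rw [List.append_assoc, List.cons_append]
        exact List.perm_middle.trans (ih'.cons b)
      | none =>
        cases hg2 : g2 p with
        | some b =>
          simp only [Option.none_or]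
          exact List.perm_middle.trans (ih.cons b)
        | none =>
          simp only [Option.none_or]
          exact ih

-- the Option.or-chain of the three class functions is exactly pvF, packaged with the index
theorem classes_orElse (p : Int × Char) :
    ((if '0' ≤ p.2 ∧ p.2 ≤ '9' then some (p.1, (p.2.toNat : Int) - 48) else none).or
      ((if 'a' ≤ p.2 ∧ p.2 ≤ 'z' then some (p.1, (p.2.toNat : Int) - 87) else none).or
        (if 'A' ≤ p.2 ∧ p.2 ≤ 'Z' then some (p.1, (p.2.toNat : Int) - 29) else none)))
    = (pvF p.2).map (fun v => (p.1, v)) := by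
  unfold pvF
  split_ifs <;> rfl

-- the three class passes together are a permutation of the in-order pair list
theorem classPairs_perm (xs : List Char) :
    (pvClassPairs 48 '0' '9' xs ++ pvClassPairs 87 'a' 'z' xs ++ pvClassPairs 29 'A' 'Z' xs).Perm
      (pvInOrder xs) := by
  unfold pvClassPairs pvInOrder
  have := perm3
    (fun p : Int × Char => if '0' ≤ p.2 ∧ p.2 ≤ '9' then some (p.1, (p.2.toNat : Int) - 48) else none)
    (fun p : Int × Char => if 'a' ≤ p.2 ∧ p.2 ≤ 'z' then some (p.1, (p.2.toNat : Int) - 87) else none)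
    (fun p : Int × Char => if 'A' ≤ p.2 ∧ p.2 ≤ 'Z' then some (p.1, (p.2.toNat : Int) - 29) else none)
    (by intro p
        by_cases h : '0' ≤ p.2 ∧ p.2 ≤ '9'
        · right
          have hn : ¬ ('a' ≤ p.2 ∧ p.2 ≤ 'z') := by
            rintro ⟨h1, _⟩; exact absurd (le_trans h1 h.2 : ('a' : Char) ≤ '9') (by decide)
          simp [hn]
        · left; simp [h])
    (by intro p
        by_cases h : '0' ≤ p.2 ∧ p.2 ≤ '9'
        · right
          have hn : ¬ ('A' ≤ p.2 ∧ p.2 ≤ 'Z') := by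
            rintro ⟨h1, _⟩; exact absurd (le_trans h1 h.2 : ('A' : Char) ≤ '9') (by decide)
          simp [hn]
        · left; simp [h])
    (by intro p
        by_cases h : 'a' ≤ p.2 ∧ p.2 ≤ 'z'
        · right
          have hn : ¬ ('A' ≤ p.2 ∧ p.2 ≤ 'Z') := by
            rintro ⟨_, h2⟩; exact absurd (le_trans h.1 h2 : ('a' : Char) ≤ 'Z') (by decide)
          simp [hn]
        · left; simp [h])
    (PySem.List.enumerate xs)
  refine this.trans (List.Perm.of_eq ?_)
  exact List.filterMap_congr (fun p _ => classes_orElse p)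

-- the in-order pair list is strictly increasing on the index
theorem inOrder_pairwise (xs : List Char) :
    (pvInOrder xs).Pairwise (fun a b : Int × Int => a.1 < b.1) := by
  unfold pvInOrder
  rw [List.pairwise_filterMap]
  refine (PySem.List.pairwise_lt_enumerate xs 0).imp ?_
  intro p q hpq b hb b' hb'
  cases hf : pvF p.2 <;> rw [hf] at hb <;> cases hb
  cases hf' : pvF q.2 <;> rw [hf'] at hb' <;> cases hb'
  simpa using hpq

-- sorting the concatenated passes by index recovers the in-order list
theorem sorted_classPairs (xs : List Char) :
    PySem.List.sorted
      (pvClassPairs 48 '0' '9' xs ++ pvClassPairs 87 'a' 'z' xs ++ pvClassPairs 29 'A' 'Z' xs)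
      (fun p => p.1) false = pvInOrder xs :=
  PySem.List.sorted_eq_of_perm_of_pairwise_lt _ _ _
    ((classPairs_perm xs).symm) (inOrder_pairwise xs)

-- projecting the values of the in-order pair list is the plain filterMap
theorem map_snd_inOrder (xs : List Char) : ∀ s : Int,
    ((PySem.List.enumerate xs s).filterMap
        (fun p => (pvF p.2).map (fun v => (p.1, v)))).map (fun p => p.2)
      = xs.filterMap pvF := by
  induction xs with
  | nil => intro s; rfl
  | cons c xs ih =>
    intro s
    rw [PySem.List.enumerate_cons]
    simp only [List.filterMap_cons]
    cases pvF c <;> simp [ih]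

-- ===== VERDICT (by name: the statement is the Claim_ definition above) =====
theorem vector_mesaj_spec : Claim_equal_vector_mesaj := by
  intro mesaj hdom
  unfold Spec_vector_mesaj vector_mesaj vector_mesaj_alt
  show List.foldl vectorMesajStep [] mesaj.toList =
    ((PySem.List.sorted
        (pvClassPairs 48 '0' '9' mesaj.toList ++ pvClassPairs 87 'a' 'z' mesaj.toList ++
          pvClassPairs 29 'A' 'Z' mesaj.toList)
        (fun p => p.1) false).map (fun p => p.2))
  rw [sorted_classPairs]
  rw [a_eq_filterMap mesaj.toList
    (by simpa [Dom_vector_mesaj, pvDomStr, List.all_eq_true] using hdom)]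
  exact (map_snd_inOrder mesaj.toList 0).symm
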